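-- pv_equiv track=rewrite | github.com/Glen02lee/PPS_solved | 3주차 제출/A051_이민석_20250720.py | get_dial_time
-- ===== SOURCE A (Python) =====
-- def get_dial_time(word):
--     dial_map = {
--         3: "ABC", 4: "DEF", 5: "GHI", 6: "JKL",
--         7: "MNO", 8: "PQRS", 9: "TUV", 10: "WXYZ"
--     }
--
--     time = 0
--     for ch in word:
--         for key, chars in dial_map.items():
--             if ch in chars:
--                 time += key
--                 break
--     return time
-- ===== SOURCE B (Python) =====
-- def get_dial_time(word):
--     # Closed-form arithmetic on the character code: the dial keys cover the
--     # alphabet in groups of three, except that S and Z are the fourth letters of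
--     # keys 8 and 10; subtracting one alphabet position at each of those two
--     # points makes the groups uniform, so the key is 3 + shifted_rank // 3.
--     # Non-uppercase-letter characters contribute 0, as in the table version.
--     total = 0
--     for ch in word:
--         o = ord(ch)
--         if 65 <= o <= 90:
--             total += 3 + (o - 65 - (o >= 83) - (o >= 90)) // 3
--     return total
-- ===== Notes on version B (the rewrite author's own statement) =====
-- stated objective: faster
-- what changed: Replaces the group-table lookup entirely by closed-form arithmetic on the character code (key = 3 + shifted_rank // 3, with a rank shift at S and Z for the four-letter keys), so no table is built or scanned.
import Mathlib
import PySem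

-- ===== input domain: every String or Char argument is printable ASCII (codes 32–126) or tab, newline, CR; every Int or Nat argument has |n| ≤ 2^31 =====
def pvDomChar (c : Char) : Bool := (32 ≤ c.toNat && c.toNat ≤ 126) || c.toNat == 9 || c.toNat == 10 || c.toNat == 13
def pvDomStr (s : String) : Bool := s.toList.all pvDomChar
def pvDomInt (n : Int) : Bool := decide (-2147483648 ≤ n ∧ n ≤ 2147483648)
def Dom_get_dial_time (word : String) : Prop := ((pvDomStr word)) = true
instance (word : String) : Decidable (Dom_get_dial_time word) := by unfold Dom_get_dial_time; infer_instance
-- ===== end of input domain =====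

-- B drops A's group table entirely: the key is computed by closed-form arithmetic on the character code.

-- ===== PORT A =====
-- the dict literal dial_map (string values ported as their character lists; 'ch in chars' for a
-- single character ch is exactly character membership, ported as chars.contains ch)
def pvDialMapA : List (Int × List Char) :=
  [(3, ['A','B','C']), (4, ['D','E','F']), (5, ['G','H','I']), (6, ['J','K','L']),
   (7, ['M','N','O']), (8, ['P','Q','R','S']), (9, ['T','U','V']), (10, ['W','X','Y','Z'])]

-- inner 'for key, chars in dial_map.items(): if ch in chars: time += key; break':
-- returns the amount added to time for this character (0 when no group matches)
def pvDialScanA (ch : Char) : List (Int × List Char) → Int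
  | [] => 0
  | (key, chars) :: rest => if chars.contains ch then key else pvDialScanA ch rest

def get_dial_time (word : String) : Int :=
  word.toList.foldl (fun time ch => time + pvDialScanA ch pvDialMapA) 0

-- ===== PORT B =====
-- Source B's per-character arithmetic: o = ord(ch); if 65 <= o <= 90 then
-- 3 + (o - 65 - (o >= 83) - (o >= 90)) // 3 else 0 (Python bools counted as ints;
-- operands are nonnegative here so Int floordiv agrees with PySem.Int.floordiv)
def pvKeyB (ch : Char) : Int :=
  if 65 ≤ (ch.toNat : Int) ∧ (ch.toNat : Int) ≤ 90 then
    3 + PySem.Int.floordiv ((ch.toNat : Int) - 65 - (if 83 ≤ (ch.toNat : Int) then 1 else 0)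
        - (if 90 ≤ (ch.toNat : Int) then 1 else 0)) 3
  else 0

def get_dial_time_alt (word : String) : Int :=
  word.toList.foldl (fun total ch => total + pvKeyB ch) 0

-- ===== PRECONDITION & SPEC =====
def Spec_get_dial_time (word : String) (out : Int) : Prop := out = get_dial_time_alt word
instance (word : String) (out : Int) : Decidable (Spec_get_dial_time word out) := by unfold Spec_get_dial_time; infer_instance

-- ===== CLAIM (what is proved, stated in full; the proofs are below) =====
def Claim_equal_get_dial_time : Prop := ∀ (word : String), Dom_get_dial_time word → Spec_get_dial_time word (get_dial_time word)

-- ===== LEMMAS AND PROOFS =====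

-- scanning yields 0 when the character is in no group
lemma pvScan_zero (ch : Char) (gs : List (Int × List Char)) (h : ∀ p ∈ gs, ch ∉ p.2) :
    pvDialScanA ch gs = 0 := by
  induction gs with
  | nil => rfl
  | cons p rest ih =>
    have h1 : ch ∉ p.2 := h p (List.mem_cons_self ..)
    simp [pvDialScanA, h1]
    exact ih (fun q hq => h q (List.mem_cons_of_mem _ hq))

-- per character, A's first-matching-group scan equals B's arithmetic formula
lemma pvScan_eq_key (ch : Char) : pvDialScanA ch pvDialMapA = pvKeyB ch := by
  by_cases h : 65 ≤ ch.toNat ∧ ch.toNat ≤ 90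
  · obtain ⟨h1, h2⟩ := h
    obtain ⟨n, hn, hn1, hn2⟩ : ∃ n, ch = Char.ofNat n ∧ 65 ≤ n ∧ n ≤ 90 :=
      ⟨ch.toNat, (Char.ofNat_toNat ch).symm, h1, h2⟩
    subst hn
    interval_cases n <;> decide
  · have key0 : pvKeyB ch = 0 := by
      unfold pvKeyB
      rw [if_neg (by omega)]
    rw [key0]
    refine pvScan_zero ch pvDialMapA (fun p hp hmem => h ?_)
    fin_cases hp <;> fin_cases hmem <;> decide

lemma pvFold_eq (l : List Char) (acc : Int) :
    l.foldl (fun time ch => time + pvDialScanA ch pvDialMapA) acc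
      = l.foldl (fun total ch => total + pvKeyB ch) acc := by
  induction l generalizing acc with
  | nil => rfl
  | cons c t ih => simp only [List.foldl, pvScan_eq_key c, ih]

-- ===== VERDICT (by name: the statement is the Claim_ definition above) =====
theorem get_dial_time_spec : Claim_equal_get_dial_time := by
  intro word _
  unfold Spec_get_dial_time get_dial_time get_dial_time_alt
  exact pvFold_eq word.toList 0
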